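-- pv_equiv track=rewrite | github.com/baranskixx/agh-ust-algorithms-and-data-structures | 20-21/egz0/zad1.py | tanagram
-- ===== SOURCE A (Python) =====
-- from collections import deque
--
-- def tanagram(x, y, t):
--     if len(x) != len(y):
--         return False
--
--     n = len(x)
--     letters = [deque() for _ in range(26)]
--
--     for i, ch in enumerate(x):
--         queue_index = ord(ch) - ord('a')
--         letters[queue_index].append(i)
--
--     for i, ch in enumerate(y):
--         queue_index = ord(ch) - ord('a')
--         if len(letters[queue_index]) == 0:
--             return False
--         diff = abs(i - letters[queue_index].popleft())
--         if diff > t: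
--             return False
--
--     return True
-- ===== SOURCE B (Python) =====
-- def tanagram(x, y, t):
--     # Different decomposition: build full per-letter index tables for BOTH strings,
--     # then compare the 26 letter classes pairwise (A instead streams y against
--     # per-letter queues of x). Same ord-97 list indexing as A, so Python's
--     # negative-index wraparound and IndexError behaviour is the natural one here.
--     if len(x) != len(y):
--         return False
--     xpos = [[] for _ in range(26)]
--     ypos = [[] for _ in range(26)]
--     for i in range(len(x)):
--         xpos[ord(x[i]) - 97].append(i)
--     for i in range(len(y)):
--         ypos[ord(y[i]) - 97].append(i)
--     for c in range(26):
--         if len(xpos[c]) != len(ypos[c]):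
--             return False
--         for a, b in zip(xpos[c], ypos[c]):
--             if abs(a - b) > t:
--                 return False
--     return True
-- ===== Notes on version B (the rewrite author's own statement) =====
-- stated objective: alternative
-- what changed: Replaces A's single streaming pass of y against per-letter deques (pop-and-compare as y is scanned) by building complete per-letter index tables for both strings and then comparing the 26 letter classes pairwise (length check plus zipped distance check).
-- outside the precondition, e.g. on tanagram('ab', 'c~', 0): A returns False, B raises IndexError
import Mathlib
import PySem

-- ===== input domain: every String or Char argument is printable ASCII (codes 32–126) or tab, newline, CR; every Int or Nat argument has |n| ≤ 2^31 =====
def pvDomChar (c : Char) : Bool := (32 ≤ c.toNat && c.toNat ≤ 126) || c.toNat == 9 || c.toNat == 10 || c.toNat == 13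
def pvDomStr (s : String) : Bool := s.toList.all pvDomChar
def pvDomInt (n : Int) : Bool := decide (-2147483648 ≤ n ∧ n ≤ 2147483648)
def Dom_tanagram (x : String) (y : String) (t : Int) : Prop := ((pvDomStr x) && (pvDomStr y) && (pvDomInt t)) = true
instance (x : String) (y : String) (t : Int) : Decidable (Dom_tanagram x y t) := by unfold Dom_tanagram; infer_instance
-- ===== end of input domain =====

-- B replaces A's streaming scan of y against per-letter queues of x by building full
-- per-letter index tables for both strings and comparing the 26 classes pairwise
-- (alternative decomposition, same cost); equivalence is about the return value.

-- Shared helper: exact Python list-index normalisation (negative index counts from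
-- the end; none = IndexError), used by both ports for `letters[ord(ch) - 97]`.
def pyListIdx (n : Nat) (q : Int) : Option Nat :=
  if 0 ≤ q then (if q < (n : Int) then some q.toNat else none)
  else (if -(n : Int) ≤ q then some (q + n).toNat else none)

-- ===== PORT A =====
-- `for i, ch in enumerate(x): letters[ord(ch)-97].append(i)`
def buildA : List Char → Nat → List (List Nat) → Option (List (List Nat))
  | [], _, L => some L
  | ch :: cs, i, L =>
    match pyListIdx L.length ((ch.toNat : Int) - 97) with
    | none => none
    | some j => buildA cs (i + 1) (L.set j (L[j]! ++ [i]))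

-- `for i, ch in enumerate(y): … popleft … diff > t …`
def scanA (t : Int) : List Char → Nat → List (List Nat) → Option Bool
  | [], _, _ => some true
  | ch :: cs, i, L =>
    match pyListIdx L.length ((ch.toNat : Int) - 97) with
    | none => none
    | some j =>
      match L[j]! with
      | [] => some false
      | p :: ps =>
        if |(i : Int) - (p : Int)| > t then some false
        else scanA t cs (i + 1) (L.set j ps)

def tanagram (x : String) (y : String) (t : Int) : Bool :=
  if x.toList.length ≠ y.toList.length then false
  else
    match buildA x.toList 0 (List.replicate 26 []) with
    | none => false  -- unreachable under Pre_ (A raises IndexError there)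
    | some L => (scanA t y.toList 0 L).getD false  -- getD: unreachable under Pre_

-- ===== PORT B =====
-- `for i in range(len(s)): pos[ord(s[i])-97].append(i)` (B builds both tables fully)
def buildB : List Char → Nat → List (List Nat) → Option (List (List Nat))
  | [], _, P => some P
  | ch :: cs, i, P =>
    match pyListIdx P.length ((ch.toNat : Int) - 97) with
    | none => none
    | some j => buildB cs (i + 1) (P.set j (P[j]! ++ [i]))

-- inner `for a, b in zip(xpos[c], ypos[c]): if abs(a - b) > t: return False`
def zipOK (t : Int) : List Nat → List Nat → Bool
  | a :: as, b :: bs => if |(a : Int) - (b : Int)| > t then false else zipOK t as bs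
  | _, _ => true

-- `for c in range(26)` over the two 26-entry tables = lockstep recursion on them
def checkB (t : Int) : List (List Nat) → List (List Nat) → Bool
  | xs :: xrest, ys :: yrest =>
    if xs.length ≠ ys.length then false
    else zipOK t xs ys && checkB t xrest yrest
  | _, _ => true

def tanagram_alt (x : String) (y : String) (t : Int) : Bool :=
  if x.toList.length ≠ y.toList.length then false
  else
    match buildB x.toList 0 (List.replicate 26 []),
          buildB y.toList 0 (List.replicate 26 []) with
    | some xp, some yp => checkB t xp yp
    | _, _ => false  -- unreachable under Pre_ (B raises IndexError there)

-- ===== PRECONDITION & SPEC =====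
-- Pre_ excludes (for equal-length inputs) strings containing a character outside
-- ASCII 71–122 ('G'–'z'): there `letters[ord(ch)-97]` raises IndexError — A may
-- instead return False before reaching the offending character of y, while B,
-- which indexes all of y first, raises (see cites).
def chOK (c : Char) : Bool := 71 ≤ c.toNat && c.toNat ≤ 122
def Pre_tanagram (x : String) (y : String) (t : Int) : Prop :=
  x.toList.length = y.toList.length →
    (x.toList.all chOK = true ∧ y.toList.all chOK = true)
instance (x : String) (y : String) (t : Int) : Decidable (Pre_tanagram x y t) := by
  unfold Pre_tanagram; infer_instance

def pvWitness_tanagram : String × String × Int := ("aab", "aba", 1)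

def Spec_tanagram (x : String) (y : String) (t : Int) (out : Bool) : Prop := out = tanagram_alt x y t
instance (x : String) (y : String) (t : Int) (out : Bool) : Decidable (Spec_tanagram x y t out) := by unfold Spec_tanagram; infer_instance

-- ===== CLAIM (what is proved, stated in full; the proofs are below) =====
def Claim_equal_tanagram : Prop := ∀ (x : String) (y : String) (t : Int), Dom_tanagram x y t → Pre_tanagram x y t → Spec_tanagram x y t (tanagram x y t)

-- ===== LEMMAS AND PROOFS =====

-- model: class of a character, its positions in a string suffix
def cls (ch : Char) : Nat := (ch.toNat + 7) % 26

def poss (c : Nat) : Nat → List Char → List Nat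
  | _, [] => []
  | i, ch :: cs => if cls ch = c then i :: poss c (i + 1) cs else poss c (i + 1) cs

def Valid (l : List Char) : Prop := ∀ c ∈ l, 71 ≤ c.toNat ∧ c.toNat ≤ 122

-- prefix match: A's queue test (y-class list matched against a prefix of x's queue)
def pm (t : Int) : List Nat → List Nat → Bool
  | _, [] => true
  | [], _ :: _ => false
  | a :: as, b :: bs => if |(b : Int) - (a : Int)| > t then false else pm t as bs

def pmAllB (t : Int) (L : List (List Nat)) (f : Nat → List Nat) : Bool :=
  (List.range 26).all (fun c => pm t (L[c]!) (f c))

lemma pmAllB_eq_true (t : Int) (L : List (List Nat)) (f : Nat → List Nat) :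
    pmAllB t L f = true ↔ ∀ c, c < 26 → pm t (L[c]!) (f c) = true := by
  simp [pmAllB, List.all_eq_true, List.mem_range]

lemma all_chOK_valid (l : List Char) (h : l.all chOK = true) : Valid l := by
  intro c hc
  have h1 := List.all_eq_true.mp h c hc
  simpa [chOK] using h1

lemma pyListIdx_cls (ch : Char) (h : 71 ≤ ch.toNat ∧ ch.toNat ≤ 122) :
    pyListIdx 26 ((ch.toNat : Int) - 97) = some (cls ch) := by
  unfold pyListIdx cls
  split_ifs with h1 h2 h3 <;> simp_all <;> omega

lemma cls_lt (ch : Char) : cls ch < 26 := Nat.mod_lt _ (by omega)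

lemma getbang_set_self (L : List (List Nat)) (j : Nat) (v : List Nat) (h : j < L.length) :
    (L.set j v)[j]! = v := by
  rw [getElem!_pos (L.set j v) j (by simpa using h)]
  exact List.getElem_set_self (by simpa using h)

lemma getbang_set_ne (L : List (List Nat)) (j c : Nat) (v : List Nat)
    (hc : c < L.length) (hne : j ≠ c) : (L.set j v)[c]! = L[c]! := by
  rw [getElem!_pos (L.set j v) c (by simpa using hc), getElem!_pos L c hc]
  simp [hne]

lemma poss_cons_ne (c : Nat) (i : Nat) (ch : Char) (cs : List Char) (h : cls ch ≠ c) :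
    poss c i (ch :: cs) = poss c (i + 1) cs := by
  simp only [poss, if_neg h]

lemma build_spec : ∀ (l : List Char) (i : Nat) (L : List (List Nat)),
    Valid l → L.length = 26 →
    ∃ L', buildA l i L = some L' ∧ L'.length = 26 ∧
      ∀ c, c < 26 → L'[c]! = L[c]! ++ poss c i l := by
  intro l
  induction l with
  | nil => intro i L _ hL; exact ⟨L, rfl, hL, by simp [poss]⟩
  | cons ch cs ih =>
    intro i L hv hL
    have hch := hv ch (by simp)
    have hvcs : Valid cs := fun c hc => hv c (by simp [hc])
    have hidx : pyListIdx L.length ((ch.toNat : Int) - 97) = some (cls ch) := by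
      rw [hL]; exact pyListIdx_cls ch hch
    have hj : cls ch < L.length := by rw [hL]; exact cls_lt ch
    obtain ⟨L', hrun, hlen, hget⟩ :=
      ih (i + 1) (L.set (cls ch) (L[cls ch]! ++ [i])) hvcs (by simp [hL])
    refine ⟨L', ?_, hlen, ?_⟩
    · simp only [buildA, hidx]; exact hrun
    · intro c hc
      have hgc := hget c hc
      have hcL : c < L.length := by omega
      by_cases hce : cls ch = c
      · subst hce
        rw [hgc, getbang_set_self L _ _ hj]
        simp [poss, List.append_assoc]
      · rw [hgc, getbang_set_ne L _ c _ hcL hce, poss_cons_ne c i ch cs hce]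

lemma buildB_eq_buildA : ∀ (l : List Char) (i : Nat) (L : List (List Nat)),
    buildB l i L = buildA l i L := by
  intro l
  induction l with
  | nil => intro i L; rfl
  | cons ch cs ih =>
    intro i L
    simp only [buildB, buildA]
    cases pyListIdx L.length ((ch.toNat : Int) - 97) <;> simp [ih]

-- A's y-scan returns, and returns true iff every class prefix-matches
lemma scan_spec (t : Int) : ∀ (ys : List Char) (i : Nat) (L : List (List Nat)),
    Valid ys → L.length = 26 →
    scanA t ys i L = some (pmAllB t L (fun c => poss c i ys)) := by
  intro ys
  induction ys with
  | nil =>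
    intro i L _ hL
    simp only [scanA, Option.some.injEq]
    symm
    rw [pmAllB_eq_true]
    intro c _
    simp [poss, pm]
  | cons ch cs ih =>
    intro i L hv hL
    have hch := hv ch (by simp)
    have hvcs : Valid cs := fun c hc => hv c (by simp [hc])
    have hidx : pyListIdx L.length ((ch.toNat : Int) - 97) = some (cls ch) := by
      rw [hL]; exact pyListIdx_cls ch hch
    have hj : cls ch < L.length := by rw [hL]; exact cls_lt ch
    simp only [scanA, hidx]
    cases hLc : L[cls ch]! with
    | nil =>
      symm
      simp only [Option.some.injEq, Bool.eq_false_iff, Ne, pmAllB_eq_true]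
      intro hall
      have h1 := hall (cls ch) (cls_lt ch)
      rw [hLc] at h1
      simp [poss, pm] at h1
    | cons p ps =>
      dsimp only
      by_cases hd : |(i : Int) - (p : Int)| > t
      · rw [if_pos hd]
        symm
        simp only [Option.some.injEq, Bool.eq_false_iff, Ne, pmAllB_eq_true]
        intro hall
        have h1 := hall (cls ch) (cls_lt ch)
        rw [hLc] at h1
        simp [poss, pm, hd] at h1
      · rw [if_neg hd]
        rw [ih (i + 1) (L.set (cls ch) ps) hvcs (by simp [hL])]
        rw [Option.some.injEq, Bool.eq_iff_iff, pmAllB_eq_true, pmAllB_eq_true]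
        constructor
        · intro hall c hc
          have hcL : c < L.length := by omega
          by_cases hce : cls ch = c
          · subst hce
            have h1 := hall _ hc
            rw [getbang_set_self L _ _ hj] at h1
            rw [hLc]
            simp [poss, pm, hd]
            exact h1
          · have h1 := hall c hc
            rw [getbang_set_ne L _ c _ hcL hce] at h1
            rw [poss_cons_ne c i ch cs hce]
            exact h1
        · intro hall c hc
          have hcL : c < L.length := by omega
          by_cases hce : cls ch = c
          · subst hce
            have h1 := hall _ hc
            rw [hLc] at h1
            simp [poss, pm, hd] at h1
            rw [getbang_set_self L _ _ hj]
            exact h1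
          · have h1 := hall c hc
            rw [poss_cons_ne c i ch cs hce] at h1
            rw [getbang_set_ne L _ c _ hcL hce]
            exact h1

lemma pm_iff (t : Int) : ∀ (as bs : List Nat),
    pm t as bs = true ↔ bs.length ≤ as.length ∧ zipOK t as bs = true := by
  intro as
  induction as with
  | nil => intro bs; cases bs <;> simp [pm, zipOK]
  | cons a as ih =>
    intro bs
    cases bs with
    | nil => simp [pm, zipOK]
    | cons b bs =>
      simp only [pm, zipOK, List.length_cons]
      rw [abs_sub_comm]
      split_ifs with h
      · simp
      · rw [ih]
        constructor <;> rintro ⟨h1, h2⟩ <;> exact ⟨by omega, h2⟩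

lemma checkB_iff (t : Int) : ∀ (xs ys : List (List Nat)), xs.length = ys.length →
    (checkB t xs ys = true ↔
      ∀ c, c < xs.length →
        (xs[c]!.length = ys[c]!.length ∧ zipOK t xs[c]! ys[c]! = true)) := by
  intro xs
  induction xs with
  | nil => intro ys h; cases ys <;> simp [checkB] at h ⊢
  | cons a as ih =>
    intro ys h
    cases ys with
    | nil => simp at h
    | cons b bs =>
      have h' : as.length = bs.length := by simpa using h
      simp only [checkB]
      have hab : ∀ (v : List Nat) (vs : List (List Nat)), (v :: vs)[0]! = v := by
        intro v vs; rw [getElem!_pos (v :: vs) 0 (by simp)]; rfl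
      have hsucc : ∀ (v : List Nat) (vs : List (List Nat)) (n : Nat), n < vs.length →
          (v :: vs)[n + 1]! = vs[n]! := by
        intro v vs n hn
        rw [getElem!_pos (v :: vs) (n + 1) (by simpa using hn), getElem!_pos vs n hn]
        simp
      split_ifs with hl
      · constructor
        · intro h'; cases h'
        · intro hall
          have := (hall 0 (by simp)).1
          rw [hab a as, hab b bs] at this
          exact hl this
      · rw [Bool.and_eq_true, ih bs (by simpa using h)]
        constructor
        · rintro ⟨hz, hrest⟩ c hc
          cases c with
          | zero => rw [hab a as, hab b bs]; exact ⟨by omega, hz⟩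
          | succ n =>
            have hn : n < as.length := by simpa using hc
            rw [hsucc a as n hn, hsucc b bs n (by omega)]
            exact hrest n hn
        · intro hall
          constructor
          · have := (hall 0 (by simp)).2
            rw [hab a as, hab b bs] at this
            exact this
          · intro n hn
            have := hall (n + 1) (by simpa using hn)
            rw [hsucc a as n hn, hsucc b bs n (by omega)] at this
            exact this

-- counting: the 26 class-position lists partition the positions
lemma poss_length_sum : ∀ (l : List Char) (i : Nat), Valid l →
    (∑ c ∈ Finset.range 26, (poss c i l).length) = l.length := by
  intro l
  induction l with
  | nil => intro i _; simp [poss]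
  | cons ch cs ih =>
    intro i hv
    have hvcs : Valid cs := fun c hc => hv c (by simp [hc])
    have hj : cls ch < 26 := cls_lt ch
    have hstep : ∀ c ∈ Finset.range 26, (poss c i (ch :: cs)).length =
        (if c = cls ch then 1 else 0) + (poss c (i + 1) cs).length := by
      intro c _
      simp only [poss]
      by_cases hce : cls ch = c
      · rw [if_pos hce, if_pos hce.symm]; simp [Nat.add_comm]
      · rw [if_neg hce, if_neg (fun hh : c = cls ch => hce hh.symm)]; simp
    rw [Finset.sum_congr rfl hstep, Finset.sum_add_distrib,
      Finset.sum_ite_eq' (Finset.range 26) (cls ch) (fun _ => 1)]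
    rw [if_pos (Finset.mem_range.mpr hj), ih (i + 1) hvcs]
    simp [Nat.add_comm]

-- ===== VERDICT (by name: the statement is the Claim_ definition above) =====
theorem tanagram_spec : Claim_equal_tanagram := by
  intro x y t _ hpre
  unfold Spec_tanagram tanagram tanagram_alt
  by_cases hlen : x.toList.length = y.toList.length
  · obtain ⟨hax, hay⟩ := hpre hlen
    have hvx := all_chOK_valid x.toList hax
    have hvy := all_chOK_valid y.toList hay
    rw [if_neg (by omega), if_neg (by omega)]
    obtain ⟨Lx, hrunx, hlenx, hgetx⟩ :=
      build_spec x.toList 0 (List.replicate 26 []) hvx (by simp)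
    obtain ⟨Ly, hruny, hleny, hgety⟩ :=
      build_spec y.toList 0 (List.replicate 26 []) hvy (by simp)
    rw [hrunx, buildB_eq_buildA, buildB_eq_buildA, hrunx, hruny]
    dsimp only
    rw [scan_spec t y.toList 0 Lx hvy hlenx]
    simp only [Option.getD_some]
    have hrepl : ∀ c, c < 26 → (List.replicate 26 ([] : List Nat))[c]! = [] := by
      intro c hc
      rw [getElem!_pos (List.replicate 26 ([] : List Nat)) c (by simpa using hc)]
      apply List.getElem_replicate
    have hx : ∀ c, c < 26 → Lx[c]! = poss c 0 x.toList := by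
      intro c hc; rw [hgetx c hc, hrepl c hc]; simp
    have hy : ∀ c, c < 26 → Ly[c]! = poss c 0 y.toList := by
      intro c hc; rw [hgety c hc, hrepl c hc]; simp
    rw [Bool.eq_iff_iff, pmAllB_eq_true, checkB_iff t Lx Ly (by omega)]
    have hsum : (∑ c ∈ Finset.range 26, (poss c 0 x.toList).length) =
        (∑ c ∈ Finset.range 26, (poss c 0 y.toList).length) := by
      rw [poss_length_sum x.toList 0 hvx, poss_length_sum y.toList 0 hvy, hlen]
    constructor
    · intro hall
      have hle : ∀ c ∈ Finset.range 26,
          (poss c 0 y.toList).length ≤ (poss c 0 x.toList).length := by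
        intro c hc
        have hc26 := Finset.mem_range.mp hc
        have hpm := (pm_iff t _ _).mp (hall c hc26)
        rw [hx c hc26] at hpm
        exact hpm.1
      have heq := (Finset.sum_eq_sum_iff_of_le hle).mp hsum.symm
      intro c hc
      have hc26 : c < 26 := by omega
      have hpm := (pm_iff t _ _).mp (hall c hc26)
      rw [hx c hc26] at hpm ⊢
      rw [hy c hc26]
      exact ⟨(heq c (Finset.mem_range.mpr hc26)).symm, hpm.2⟩
    · intro hall c hc
      have h1 := hall c (by omega)
      rw [hx c hc] at h1 ⊢
      rw [hy c hc] at h1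
      rw [pm_iff]
      exact ⟨by omega, h1.2⟩
  · rw [if_pos (by omega), if_pos (by omega)]
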